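-- pv_equiv track=rewrite | github.com/StAnonymousHY/UMD-CMSC-Codes | CMSC423_Project/P09/Peptide.py | GenerateSpectrum
-- ===== SOURCE A (Python) =====
-- def GenerateSpectrum(peptide):
--     spectrum = [0]
--
--     for i in range(0,len(peptide)):
--         sum = peptide[i]
--         spectrum.append(sum)
--         for j in range (i+1,len(peptide)):
--             sum += peptide[j]
--             spectrum.append(sum)
--
--     return spectrum
-- ===== SOURCE B (Python) =====
-- def GenerateSpectrum(peptide):
--     n = len(peptide)
--     P = [0]
--     s = 0
--     for x in peptide:
--         s += x
--         P.append(s)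
--     return [0] + [P[j + 1] - P[i] for i in range(n) for j in range(i, n)]
-- ===== Notes on version B (the rewrite author's own statement) =====
-- stated objective: alternative
-- what changed: B precomputes a prefix-sum table once and emits each subpeptide mass as a difference of two prefix sums in a comprehension, instead of A's running accumulator appended inside nested loops.
import Mathlib
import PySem

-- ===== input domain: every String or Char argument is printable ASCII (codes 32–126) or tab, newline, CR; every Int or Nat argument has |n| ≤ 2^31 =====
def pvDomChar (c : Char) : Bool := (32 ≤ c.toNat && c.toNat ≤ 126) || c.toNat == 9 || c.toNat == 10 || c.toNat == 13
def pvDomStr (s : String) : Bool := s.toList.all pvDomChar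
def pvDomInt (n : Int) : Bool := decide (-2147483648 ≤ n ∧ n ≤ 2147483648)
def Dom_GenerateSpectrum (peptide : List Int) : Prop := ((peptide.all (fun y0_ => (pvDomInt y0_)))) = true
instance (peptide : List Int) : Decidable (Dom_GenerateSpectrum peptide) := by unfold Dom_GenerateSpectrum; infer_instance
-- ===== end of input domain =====

-- B precomputes a prefix-sum table and emits each contiguous-segment mass as a difference of two
-- prefix sums, instead of A's running accumulator appended inside nested loops (alternative, same cost).


-- ===== PORT A =====
-- transliteration of A: outer loop over i; running accumulator `sum`; append each value to `spectrum`
def GenerateSpectrum (peptide : List Int) : List Int :=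
  (List.range peptide.length).foldl (fun spectrum i =>
    let s := peptide.getD i 0
    ((List.range' (i + 1) (peptide.length - (i + 1))).foldl
      (fun (st : Int × List Int) j =>
        (st.1 + peptide.getD j 0, st.2 ++ [st.1 + peptide.getD j 0]))
      (s, spectrum ++ [s])).2) [0]

-- ===== PORT B =====
-- transliteration of Source B: build the prefix-sum table P with a running sum, then the nested comprehension
def GenerateSpectrum_alt (peptide : List Int) : List Int :=
  let n := peptide.length
  let P := (peptide.foldl (fun (st : Int × List Int) x =>
              (st.1 + x, st.2 ++ [st.1 + x])) (0, [0])).2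
  0 :: (List.range n).flatMap (fun i =>
    (List.range' i (n - i)).map (fun j => P.getD (j + 1) 0 - P.getD i 0))

-- ===== PRECONDITION & SPEC =====
def Spec_GenerateSpectrum (peptide : List Int) (out : List Int) : Prop := out = GenerateSpectrum_alt peptide
instance (peptide : List Int) (out : List Int) : Decidable (Spec_GenerateSpectrum peptide out) := by unfold Spec_GenerateSpectrum; infer_instance

-- ===== CLAIM (what is proved, stated in full; the proofs are below) =====
def Claim_equal_GenerateSpectrum : Prop := ∀ (peptide : List Int), Dom_GenerateSpectrum peptide → Spec_GenerateSpectrum peptide (GenerateSpectrum peptide)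

-- ===== LEMMAS AND PROOFS =====

-- the running-sum/append fold produces the list of shifted prefix sums
theorem pv_prefix_fold (xs : List Int) (s : Int) (acc : List Int) :
    (xs.foldl (fun (st : Int × List Int) x => (st.1 + x, st.2 ++ [st.1 + x])) (s, acc)).2
      = acc ++ (List.range' 1 xs.length).map (fun k => s + (xs.take k).sum) := by
  induction xs generalizing s acc with
  | nil => simp
  | cons x xs ih =>
      rw [List.foldl_cons, ih, List.length_cons, List.range'_succ, List.map_cons]
      have h2 : List.range' 2 xs.length = (List.range' 1 xs.length).map (fun k => 1 + k) :=
        (List.map_add_range' 1 xs.length 1).symm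
      rw [h2, List.map_map]
      simp only [List.append_assoc, List.singleton_append]
      congr 2
      · simp
      · refine List.map_congr_left (fun k _ => ?_)
        simp only [Function.comp_apply, Nat.add_comm 1 k, List.take_succ_cons, List.sum_cons]
        ring

theorem pv_take_range' : ∀ (c k a : Nat), k ≤ c → (List.range' a c).take k = List.range' a k := by
  intro c
  induction c with
  | zero => intro k a h; interval_cases k; simp
  | succ c ih =>
      intro k a h
      cases k with
      | zero => simp
      | succ k => rw [List.range'_succ, List.take_succ_cons, ih k (a + 1) (by omega),
                      List.range'_succ]

theorem pv_take_succ_sum (xs : List Int) (a : Nat) (ha : a < xs.length) :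
    (xs.take (a + 1)).sum = (xs.take a).sum + xs.getD a 0 := by
  rw [List.take_add_one, List.getElem?_eq_getElem ha, Option.toList_some, List.sum_append,
      List.sum_cons, List.sum_nil, add_zero, List.getD_eq_getElem?_getD,
      List.getElem?_eq_getElem ha, Option.getD_some]

-- P[k] is the sum of the first k elements
theorem pv_P_getD (xs : List Int) (k : Nat) (hk : k ≤ xs.length) :
    ((xs.foldl (fun (st : Int × List Int) x => (st.1 + x, st.2 ++ [st.1 + x])) (0, ([0] : List Int))).2).getD k 0
      = (xs.take k).sum := by
  rw [pv_prefix_fold]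
  cases k with
  | zero => simp
  | succ k =>
      rw [List.singleton_append, List.getD_cons_succ, List.getD_eq_getElem?_getD,
          List.getElem?_eq_getElem (by simp; omega), List.getElem_map, List.getElem_range']
      simp [Nat.add_comm 1 k]

theorem pv_seg_sum (xs : List Int) :
    ∀ (c a : Nat), a + c ≤ xs.length →
      ((List.range' a c).map (fun j => xs.getD j 0)).sum
        = (xs.take (a + c)).sum - (xs.take a).sum := by
  intro c
  induction c with
  | zero => intro a _; simp
  | succ c ih =>
      intro a h
      rw [List.range'_succ, List.map_cons, List.sum_cons, ih (a + 1) (by omega),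
          pv_take_succ_sum xs a (by omega)]
      have : a + 1 + c = a + (c + 1) := by omega
      rw [this]; ring

-- the body of A's i-th outer iteration, as the list it appends to `spectrum`
def pvAblock (xs : List Int) (i : Nat) : List Int :=
  [xs.getD i 0] ++ (List.range' 1 (xs.length - (i + 1))).map
    (fun k => xs.getD i 0 + ((((List.range' (i + 1) (xs.length - (i + 1))).map (fun j => xs.getD j 0)).take k)).sum)

theorem pv_step_eq (xs : List Int) (spectrum : List Int) (i : Nat) :
    (let s := xs.getD i 0
     ((List.range' (i + 1) (xs.length - (i + 1))).foldl
       (fun (st : Int × List Int) j => (st.1 + xs.getD j 0, st.2 ++ [st.1 + xs.getD j 0]))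
       (s, spectrum ++ [s])).2)
      = spectrum ++ pvAblock xs i := by
  show (((List.range' (i + 1) (xs.length - (i + 1))).foldl
       (fun (st : Int × List Int) j => (st.1 + xs.getD j 0, st.2 ++ [st.1 + xs.getD j 0]))
       (xs.getD i 0, spectrum ++ [xs.getD i 0])).2) = _
  rw [← List.foldl_map (f := fun j => xs.getD j 0)
        (g := fun (st : Int × List Int) x => (st.1 + x, st.2 ++ [st.1 + x])),
      pv_prefix_fold]
  simp [pvAblock, List.append_assoc]

-- the i-th block, rewritten as B computes it (prefix-sum differences)
theorem pv_block (xs : List Int) (i : Nat) (hi : i < xs.length) :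
    pvAblock xs i
      = (List.range' i (xs.length - i)).map
          (fun j => (xs.take (j + 1)).sum - (xs.take i).sum) := by
  have hn : xs.length - i = (xs.length - (i + 1)) + 1 := by omega
  rw [hn, List.range'_succ]
  rw [List.map_cons]
  have hhead : (xs.take (i + 1)).sum - (xs.take i).sum = xs.getD i 0 := by
    rw [pv_take_succ_sum xs i hi]; ring
  have h2 : List.range' (i + 1) (xs.length - (i + 1))
      = (List.range' 1 (xs.length - (i + 1))).map (fun k => i + k) :=
    (List.map_add_range' 1 (xs.length - (i + 1)) 1).symm
  unfold pvAblock
  rw [hhead.symm, List.singleton_append]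
  congr 1
  conv_rhs => rw [h2, List.map_map]
  refine List.map_congr_left (fun k hk => ?_)
  have hk' : 1 ≤ k ∧ k < 1 + (xs.length - (i + 1)) := List.mem_range'_1.mp hk
  rw [← List.map_take, pv_take_range' _ _ _ (by omega),
      pv_seg_sum xs k (i + 1) (by omega),
      pv_take_succ_sum xs i hi]
  simp only [Function.comp_apply]
  have h3 : i + 1 + k = i + k + 1 := by omega
  rw [h3]; ring

-- ===== VERDICT (by name: the statement is the Claim_ definition above) =====
theorem GenerateSpectrum_spec : Claim_equal_GenerateSpectrum := by
  intro peptide _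
  unfold Spec_GenerateSpectrum GenerateSpectrum GenerateSpectrum_alt
  have hstep : (fun (spectrum : List Int) (i : Nat) =>
      (let s := peptide.getD i 0
       ((List.range' (i + 1) (peptide.length - (i + 1))).foldl
         (fun (st : Int × List Int) j => (st.1 + peptide.getD j 0, st.2 ++ [st.1 + peptide.getD j 0]))
         (s, spectrum ++ [s])).2))
      = (fun spectrum i => spectrum ++ pvAblock peptide i) := by
    funext spectrum i; exact pv_step_eq peptide spectrum i
  rw [hstep, PySem.List.foldl_append_eq_flatMap, List.singleton_append]
  congr 1
  refine List.flatMap_congr (fun i hi => ?_)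
  have hi' : i < peptide.length := List.mem_range.mp hi
  rw [pv_block peptide i hi']
  refine List.map_congr_left (fun j hj => ?_)
  have hj' : i ≤ j ∧ j < i + (peptide.length - i) := List.mem_range'_1.mp hj
  rw [pv_P_getD peptide (j + 1) (by omega), pv_P_getD peptide i (by omega)]
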